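-- pv_equiv track=rewrite | github.com/FLiPPyPwN/PaphletLearningForTrajCompression | PathletLearningScalableClass.py | FindAllPossiblePathlets
-- ===== SOURCE A (Python) =====
-- def FindAllPossiblePathlets(trajectories) :
--     AllPossiblePathlets = []
--     TpIndexesNeededForPathletLearning = []
--     SubIndexesNeededForPathletLearning = []
--
--     seen = dict()
--
--     trajCounter = 0
--     for traj in trajectories :
--         trajIndexTemp = []
--         for i in range(len(traj)) :
--             trajIndexTemp.append([])
--
--         for i in range(len(traj) + 1):
--
--             for j in range(i + 1, len(traj) + 1):
--
--                 sub = tuple(traj[i:j])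
--                 if (sub not in seen) :
--                     for k in range(i,j) :
--                         trajIndexTemp[k].append(len(AllPossiblePathlets))
--
--                     TpIndexesNeededForPathletLearning.append(1)
--                     seen[sub] = len(AllPossiblePathlets)
--                     AllPossiblePathlets.append(sub)
--                 else :
--                     index = seen[sub]
--                     TpIndexesNeededForPathletLearning[index] = TpIndexesNeededForPathletLearning[index] + 1
--
--                     for k in range(i,j) :
--                         trajIndexTemp[k].append(index)
--
--         trajCounter = trajCounter + 1
--         SubIndexesNeededForPathletLearning.append(trajIndexTemp)
--
--     return AllPossiblePathlets, TpIndexesNeededForPathletLearning,SubIndexesNeededForPathletLearning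
-- ===== SOURCE B (Python) =====
-- def FindAllPossiblePathlets(trajectories):
--     AllPossiblePathlets = []
--     TpIndexesNeededForPathletLearning = []
--     SubIndexesNeededForPathletLearning = []
--     # Incremental trie over substrings: transitions keyed by (parent state, symbol);
--     # state -1 is the root, every other state IS the id of the substring spelled by
--     # the path leading to it.  No tuple slicing/hashing of whole substrings.
--     trans = {}
--     for traj in trajectories:
--         n = len(traj)
--         ids = []  # ids[i][m] = id of traj[i : i + m + 1]
--         for i in range(n):
--             row = []
--             cur = -1
--             pref = []
--             for x in traj[i:]:
--                 pref.append(x)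
--                 key = (cur, x)
--                 if key in trans:
--                     cur = trans[key]
--                     TpIndexesNeededForPathletLearning[cur] += 1
--                 else:
--                     cur = len(AllPossiblePathlets)
--                     trans[key] = cur
--                     AllPossiblePathlets.append(tuple(pref))
--                     TpIndexesNeededForPathletLearning.append(1)
--                 row.append(cur)
--             ids.append(row)
--         # Position k is covered by traj[i:j] for i <= k < j; those ids are the
--         # suffix of row i starting at offset k - i.
--         SubIndexesNeededForPathletLearning.append(
--             [[v for i in range(k + 1) for v in ids[i][k - i:]] for k in range(n)])
--     return AllPossiblePathlets, TpIndexesNeededForPathletLearning, SubIndexesNeededForPathletLearning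
-- ===== Notes on version B (the rewrite author's own statement) =====
-- stated objective: alternative
-- what changed: B replaces A's hash-of-tuple-slices with an incremental trie/automaton (transitions keyed by (parent state, symbol), states = substring ids), walking each suffix once so no substring is sliced or hashed for dedup, and it derives the per-position coverage lists afterwards as suffixes of the per-start id rows instead of A's interleaved per-position appends.
import Mathlib
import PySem

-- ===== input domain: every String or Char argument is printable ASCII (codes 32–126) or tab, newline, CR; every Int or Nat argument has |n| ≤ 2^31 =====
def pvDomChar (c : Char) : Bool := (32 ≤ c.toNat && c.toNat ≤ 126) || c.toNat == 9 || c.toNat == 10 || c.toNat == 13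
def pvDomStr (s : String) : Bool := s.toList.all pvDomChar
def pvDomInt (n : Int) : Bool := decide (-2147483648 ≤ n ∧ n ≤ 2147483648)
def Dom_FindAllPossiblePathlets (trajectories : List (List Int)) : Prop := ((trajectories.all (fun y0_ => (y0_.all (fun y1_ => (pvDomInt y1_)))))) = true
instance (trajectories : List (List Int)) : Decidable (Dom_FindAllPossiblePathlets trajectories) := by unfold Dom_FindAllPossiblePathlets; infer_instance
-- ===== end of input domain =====

-- B deduplicates substrings with an incremental trie (transitions keyed by (parent state, symbol))
-- instead of A's dict of tuple slices, and assembles the per-position coverage lists afterwards as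
-- suffixes of the per-start id rows instead of A's interleaved per-position appends; same outputs.

-- ===== PORT A =====

-- tuple(traj[i:j]) with 0 ≤ i ≤ j
def pvSub (traj : List Int) (i j : Nat) : List Int :=
  PySem.List.slice traj (some (i : Int)) (some (j : Int))

-- the (i, j) pairs of A's nested loops: i in range(n+1), j in range(i+1, n+1)
def pvPairsA (n : Nat) : List (Nat × Nat) :=
  (List.range (n + 1)).flatMap (fun i => (List.range' (i + 1) (n - i)).map (fun j => (i, j)))

-- 'for k in range(i, j): trajIndexTemp[k].append(v)'
def pvAppendCov (t : List (List Int)) (i j : Nat) (v : Nat) : List (List Int) :=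
  (List.range' i (j - i)).foldl (fun t k => t.modify k (· ++ [(v : Int)])) t

-- body of A's inner double loop; state = (AllPossiblePathlets, TpIndexes, seen, trajIndexTemp)
def pvStepA (traj : List Int) :
    List (List Int) × List Int × PySem.Dict (List Int) Nat × List (List Int) → Nat × Nat →
    List (List Int) × List Int × PySem.Dict (List Int) Nat × List (List Int) :=
  fun (paths, counts, seen, temp) (i, j) =>
    let sub := pvSub traj i j
    match seen.get? sub with
    | none =>
        (paths ++ [sub], counts ++ [1], seen.insert sub paths.length,
         pvAppendCov temp i j paths.length)
    | some idx => (paths, counts.modify idx (· + 1), seen, pvAppendCov temp i j idx)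

-- body of A's outer loop over trajectories
def pvTrajA (st : List (List Int) × List Int × List (List (List Int)) × PySem.Dict (List Int) Nat)
    (traj : List Int) :
    List (List Int) × List Int × List (List (List Int)) × PySem.Dict (List Int) Nat :=
  match st with
  | (paths, counts, covers, seen) =>
    let temp0 := (List.range traj.length).foldl (fun t _ => t ++ [([] : List Int)]) []
    match (pvPairsA traj.length).foldl (pvStepA traj) (paths, counts, seen, temp0) with
    | (p, c, s, t) => (p, c, covers ++ [t], s)

def FindAllPossiblePathlets (trajectories : List (List Int)) :
    List (List Int) × List Int × List (List (List Int)) :=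
  match trajectories.foldl pvTrajA ([], [], [], PySem.Dict.empty) with
  | (p, c, cov, _) => (p, c, cov)

-- ===== PORT B =====

-- 'for x in traj[i:]': one trie step; state = (paths, counts, trans, row, cur, pref).
-- trans is B's trie: (parent state, symbol) ↦ substring id; state -1 is the root.
def pvWalkStep (st : List (List Int) × List Int × PySem.Dict (Int × Int) Nat × List Int × Int × List Int)
    (x : Int) :
    List (List Int) × List Int × PySem.Dict (Int × Int) Nat × List Int × Int × List Int :=
  match st with
  | (paths, counts, tr, row, cur, pref) =>
    let pref' := pref ++ [x]
    match tr.get? (cur, x) with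
    | some c =>
        (paths, counts.modify c (· + 1), tr, row ++ [(c : Int)], (c : Int), pref')
    | none =>
        (paths ++ [pref'], counts ++ [1], tr.insert (cur, x) paths.length,
         row ++ [(paths.length : Int)], (paths.length : Int), pref')

-- one start index i of B's per-trajectory loop: walk the suffix traj[i:], append the id row
def pvAltInner (traj : List Int)
    (st : List (List Int) × List Int × PySem.Dict (Int × Int) Nat × List (List Int)) (i : Nat) :
    List (List Int) × List Int × PySem.Dict (Int × Int) Nat × List (List Int) :=
  match st with
  | (p, c, tr, ids) =>
    match (PySem.List.slice traj (some (i : Int)) none).foldl pvWalkStep (p, c, tr, [], -1, []) with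
    | (p', c', tr', row, _, _) => (p', c', tr', ids ++ [row])

-- body of B's outer loop: the per-start walks, then the coverage rows as suffixes of the id rows
-- (ids[i][k-i:]: inside 'for i in range(k+1)' the Python index i and offset k-i are in range,
-- so pyGetD with default [] and the Nat-subtraction slice bound are exact)
def pvTrajAlt (st : List (List Int) × List Int × List (List (List Int)) × PySem.Dict (Int × Int) Nat)
    (traj : List Int) :
    List (List Int) × List Int × List (List (List Int)) × PySem.Dict (Int × Int) Nat :=
  match st with
  | (paths, counts, covers, tr0) =>
    match (List.range traj.length).foldl (pvAltInner traj)
        (paths, counts, tr0, ([] : List (List Int))) with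
    | (p, c, tr, ids) =>
      (p, c,
       covers ++ [(List.range traj.length).map (fun (k : Nat) =>
         (List.range (k + 1)).flatMap (fun (i : Nat) =>
           PySem.List.slice (PySem.List.pyGetD ids (i : Int) []) (some ((k - i : Nat) : Int)) none))],
       tr)

def FindAllPossiblePathlets_alt (trajectories : List (List Int)) :
    List (List Int) × List Int × List (List (List Int)) :=
  match trajectories.foldl pvTrajAlt ([], [], [], PySem.Dict.empty) with
  | (p, c, cov, _) => (p, c, cov)

-- ===== PRECONDITION & SPEC =====
def Spec_FindAllPossiblePathlets (trajectories : List (List Int)) (out : List (List Int) × List Int × List (List (List Int))) : Prop := out = FindAllPossiblePathlets_alt trajectories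
instance (trajectories : List (List Int)) (out : List (List Int) × List Int × List (List (List Int))) : Decidable (Spec_FindAllPossiblePathlets trajectories out) := by unfold Spec_FindAllPossiblePathlets; infer_instance

-- ===== CLAIM (what is proved, stated in full; the proofs are below) =====
def Claim_equal_FindAllPossiblePathlets : Prop := ∀ (trajectories : List (List Int)), Dom_FindAllPossiblePathlets trajectories → Spec_FindAllPossiblePathlets trajectories (FindAllPossiblePathlets trajectories)

-- ===== LEMMAS AND PROOFS =====

-- ---- reference implementation (proof-only): A's dict-of-tuples pass without the coverage table,
-- ---- plus the coverage rows recomputed from the finished dict; A is proved equal to it first.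

def pvPairsB (n : Nat) : List (Nat × Nat) :=
  (List.range n).flatMap (fun i => (List.range' (i + 1) (n - i)).map (fun j => (i, j)))

def pvStepB (traj : List Int) :
    List (List Int) × List Int × PySem.Dict (List Int) Nat → Nat × Nat →
    List (List Int) × List Int × PySem.Dict (List Int) Nat :=
  fun (paths, counts, seen) (i, j) =>
    let sub := pvSub traj i j
    match seen.get? sub with
    | some idx => (paths, counts.modify idx (· + 1), seen)
    | none => (paths ++ [sub], counts ++ [1], seen.insert sub paths.length)

def pvCoverB (traj : List Int) (seen : PySem.Dict (List Int) Nat) : List (List Int) :=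
  (List.range traj.length).map (fun k =>
    (List.range (k + 1)).flatMap (fun i =>
      (List.range' (k + 1) (traj.length - k)).map
        (fun j => ((seen.getD (pvSub traj i j) 0 : Nat) : Int))))

def pvTrajB (st : List (List Int) × List Int × List (List (List Int)) × PySem.Dict (List Int) Nat)
    (traj : List Int) :
    List (List Int) × List Int × List (List (List Int)) × PySem.Dict (List Int) Nat :=
  match st with
  | (paths, counts, covers, seen) =>
    match (pvPairsB traj.length).foldl (pvStepB traj) (paths, counts, seen) with
    | (p, c, s) => (p, c, covers ++ [pvCoverB traj s], s)

-- ---- stage 1: A = reference (per-trajectory) ----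

theorem pvPairs_eq (n : Nat) : pvPairsA n = pvPairsB n := by
  unfold pvPairsA pvPairsB
  rw [List.range_succ, List.flatMap_append]
  simp

theorem pvProj (traj : List Int) (ps : List (Nat × Nat)) :
    ∀ (paths : List (List Int)) (counts : List Int) (seen : PySem.Dict (List Int) Nat)
      (temp : List (List Int)),
    (let r := ps.foldl (pvStepA traj) (paths, counts, seen, temp)
     (r.1, r.2.1, r.2.2.1)) = ps.foldl (pvStepB traj) (paths, counts, seen) := by
  induction ps with
  | nil => intro paths counts seen temp; rfl
  | cons hd tl ih =>
    intro paths counts seen temp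
    obtain ⟨i, j⟩ := hd
    simp only [List.foldl_cons, pvStepA, pvStepB]
    cases h : seen.get? (pvSub traj i j) <;> simp [ih]

theorem pvMono (traj : List Int) (ps : List (Nat × Nat)) :
    ∀ (paths : List (List Int)) (counts : List Int) (seen : PySem.Dict (List Int) Nat)
      (key : List Int) (v : Nat), seen.get? key = some v →
    ((ps.foldl (pvStepB traj) (paths, counts, seen)).2.2).get? key = some v := by
  induction ps with
  | nil => intro _ _ _ _ _ h; exact h
  | cons hd tl ih =>
    intro paths counts seen key v h
    obtain ⟨i, j⟩ := hd
    simp only [List.foldl_cons, pvStepB]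
    cases hs : seen.get? (pvSub traj i j) with
    | some idx => exact ih _ _ _ _ _ h
    | none =>
      refine ih _ _ _ _ _ ?_
      rw [PySem.Dict.get?_insert]
      split
      · next heq => rw [heq] at h; rw [h] at hs; cases hs
      · exact h

theorem pvAppendCov_aux (val : Int) :
    ∀ (d i : Nat) (t : List (List Int)) (k : Nat),
    (((List.range' i d).foldl (fun t k => t.modify k (· ++ [val])) t))[k]? =
      if i ≤ k ∧ k < i + d then (t[k]?).map (· ++ [val]) else t[k]? := by
  intro d
  induction d with
  | zero =>
    intro i t k
    simp
  | succ d ih =>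
    intro i t k
    rw [List.range'_succ, List.foldl_cons, ih, List.getElem?_modify]
    cases ht : t[k]? with
    | none => simp
    | some l =>
      simp only [Option.map_eq_map, Option.map_some]
      split_ifs with h1 h2 h3 h4 h5 h6 h7 <;> first | rfl | omega

theorem pvAppendCov_getElem? (t : List (List Int)) (i j v k : Nat) :
    (pvAppendCov t i j v)[k]? =
      if i ≤ k ∧ k < j then (t[k]?).map (· ++ [(v : Int)]) else t[k]? := by
  unfold pvAppendCov
  rw [pvAppendCov_aux]
  by_cases h : i ≤ k ∧ k < j
  · rw [if_pos (by omega), if_pos h]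
  · rw [if_neg (by omega), if_neg h]

theorem pvTempSpec (traj : List Int) (ps : List (Nat × Nat)) :
    ∀ (paths : List (List Int)) (counts : List Int) (seen : PySem.Dict (List Int) Nat)
      (temp : List (List Int)) (k : Nat),
    ((ps.foldl (pvStepA traj) (paths, counts, seen, temp)).2.2.2)[k]? =
      (temp[k]?).map (fun l => l ++
        (ps.filter (fun p => decide (p.1 ≤ k ∧ k < p.2))).map
          (fun p => ((((ps.foldl (pvStepB traj) (paths, counts, seen)).2.2).getD
              (pvSub traj p.1 p.2) 0 : Nat) : Int))) := by
  induction ps with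
  | nil =>
    intro paths counts seen temp k
    simp
  | cons hd tl ih =>
    intro paths counts seen temp k
    obtain ⟨i, j⟩ := hd
    simp only [List.foldl_cons, List.filter_cons]
    cases hs : seen.get? (pvSub traj i j) with
    | none =>
      simp only [pvStepA, pvStepB, hs]
      rw [ih, pvAppendCov_getElem?]
      have hfin : ((tl.foldl (pvStepB traj) (paths ++ [pvSub traj i j], counts ++ [1],
            seen.insert (pvSub traj i j) paths.length)).2.2).get? (pvSub traj i j) =
          some paths.length :=
        pvMono traj tl _ _ _ _ _ (PySem.Dict.get?_insert_self _ _ _)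
      by_cases hc : i ≤ k ∧ k < j <;>
        cases ht : temp[k]? <;>
        simp [hc, PySem.Dict.getD_eq_get?_getD, hfin]
    | some idx =>
      simp only [pvStepA, pvStepB, hs]
      rw [ih, pvAppendCov_getElem?]
      have hfin : ((tl.foldl (pvStepB traj) (paths, counts.modify idx (· + 1),
            seen)).2.2).get? (pvSub traj i j) = some idx :=
        pvMono traj tl _ _ _ _ _ hs
      by_cases hc : i ≤ k ∧ k < j <;>
        cases ht : temp[k]? <;>
        simp [hc, PySem.Dict.getD_eq_get?_getD, hfin]

theorem pvRangeSplit (a b c : Nat) (hab : a ≤ b) (hbc : b ≤ c) :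
    List.range' a (c - a) = List.range' a (b - a) ++ List.range' b (c - b) := by
  rw [show c - a = (b - a) + (c - b) by omega, ← List.range'_append]
  congr 2
  omega

theorem pvFilterInner (n k i : Nat) (hik : i ≤ k) (hk : k < n) :
    (List.range' (i + 1) (n - i)).filter (fun j => decide (i ≤ k ∧ k < j)) =
      List.range' (k + 1) (n - k) := by
  rw [show n - i = n + 1 - (i + 1) by omega,
    pvRangeSplit (i + 1) (k + 1) (n + 1) (by omega) (by omega), List.filter_append]
  have h1 : (List.range' (i + 1) (k + 1 - (i + 1))).filter
      (fun j => decide (i ≤ k ∧ k < j)) = [] := by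
    rw [List.filter_eq_nil_iff]
    intro j hj
    rw [List.mem_range'_1] at hj
    simp only [decide_eq_true_eq]
    omega
  have h2 : (List.range' (k + 1) (n + 1 - (k + 1))).filter
      (fun j => decide (i ≤ k ∧ k < j)) = List.range' (k + 1) (n + 1 - (k + 1)) := by
    rw [List.filter_eq_self]
    intro j hj
    rw [List.mem_range'_1] at hj
    simp only [decide_eq_true_eq]
    omega
  rw [h1, h2, List.nil_append, show n + 1 - (k + 1) = n - k by omega]

theorem pvFilterPairs (n k : Nat) (hk : k < n) (g : Nat × Nat → Int) :
    ((pvPairsB n).filter (fun p => decide (p.1 ≤ k ∧ k < p.2))).map g =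
      (List.range (k + 1)).flatMap (fun i =>
        (List.range' (k + 1) (n - k)).map (fun j => g (i, j))) := by
  rw [pvPairsB, List.filter_flatMap, List.map_flatMap]
  have hsplit := pvRangeSplit 0 (k + 1) n (by omega) (by omega)
  rw [Nat.sub_zero] at hsplit
  rw [List.range_eq_range', hsplit, List.flatMap_append]
  have h2 : (List.range' (k + 1) (n - (k + 1))).flatMap
      (fun i => (((List.range' (i + 1) (n - i)).map (fun j => (i, j))).filter
        (fun p => decide (p.1 ≤ k ∧ k < p.2))).map g) = [] := by
    apply List.flatMap_eq_nil_iff.mpr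
    intro i hi
    rw [List.mem_range'_1] at hi
    have : ((List.range' (i + 1) (n - i)).map (fun j => (i, j))).filter
        (fun p => decide (p.1 ≤ k ∧ k < p.2)) = [] := by
      rw [List.filter_eq_nil_iff]
      intro p hp
      rw [List.mem_map] at hp
      obtain ⟨j, _, rfl⟩ := hp
      simp only [decide_eq_true_eq]
      omega
    rw [this, List.map_nil]
  rw [h2, List.append_nil, Nat.sub_zero, ← List.range_eq_range']
  apply List.flatMap_congr
  intro i hi
  rw [List.mem_range] at hi
  rw [List.filter_map, List.map_map]
  have := pvFilterInner n k i (by omega) hk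
  simp only [Function.comp_def] at this ⊢
  rw [this]

theorem pvTemp0 (n : Nat) :
    (List.range n).foldl (fun t _ => t ++ [([] : List Int)]) [] = List.replicate n [] := by
  induction n with
  | zero => rfl
  | succ n ih =>
    rw [List.range_succ, List.foldl_append, ih, List.replicate_succ']
    rfl

theorem pvTraj_eq (st : List (List Int) × List Int × List (List (List Int)) × PySem.Dict (List Int) Nat)
    (traj : List Int) : pvTrajA st traj = pvTrajB st traj := by
  obtain ⟨paths, counts, covers, seen⟩ := st
  unfold pvTrajA pvTrajB
  rw [pvPairs_eq, pvTemp0]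
  have hproj := pvProj traj (pvPairsB traj.length) paths counts seen
    (List.replicate traj.length [])
  simp only at hproj
  show ((((pvPairsB traj.length).foldl (pvStepA traj)
      (paths, counts, seen, List.replicate traj.length [])).1,
    ((pvPairsB traj.length).foldl (pvStepA traj)
      (paths, counts, seen, List.replicate traj.length [])).2.1,
    covers ++ [((pvPairsB traj.length).foldl (pvStepA traj)
      (paths, counts, seen, List.replicate traj.length [])).2.2.2],
    ((pvPairsB traj.length).foldl (pvStepA traj)
      (paths, counts, seen, List.replicate traj.length [])).2.2.1) : _) =
    (((pvPairsB traj.length).foldl (pvStepB traj) (paths, counts, seen)).1,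
     ((pvPairsB traj.length).foldl (pvStepB traj) (paths, counts, seen)).2.1,
     covers ++ [pvCoverB traj
       ((pvPairsB traj.length).foldl (pvStepB traj) (paths, counts, seen)).2.2],
     ((pvPairsB traj.length).foldl (pvStepB traj) (paths, counts, seen)).2.2)
  obtain ⟨h1, h2, h4⟩ : _ ∧ _ ∧ _ := by simpa [Prod.ext_iff] using hproj
  rw [h1, h2, h4]
  refine congrArg (fun t => (_, _, covers ++ [t], _)) ?_
  apply List.ext_getElem?
  intro k
  rw [pvTempSpec traj (pvPairsB traj.length) paths counts seen
    (List.replicate traj.length []) k, List.getElem?_replicate]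
  unfold pvCoverB
  rw [List.getElem?_map]
  by_cases hk : k < traj.length
  · rw [if_pos hk, List.getElem?_range hk]
    simp only [Option.map_some, Option.some.injEq, List.nil_append]
    rw [pvFilterPairs traj.length k hk]
  · rw [if_neg hk, List.getElem?_eq_none (by simpa using hk)]
    rfl

-- ---- stage 2: reference = B (trie simulation) ----

-- what trie state s spells: the root spells [], state v spells paths[v]
def pvRep? (paths : List (List Int)) (s : Int) : Option (List Int) :=
  if s = -1 then some [] else if 0 ≤ s then paths[s.toNat]? else none

-- the simulation invariant between the reference dict 'seen' and B's trie 'trans'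
def pvInv (paths : List (List Int)) (seen : PySem.Dict (List Int) Nat)
    (trans : PySem.Dict (Int × Int) Nat) : Prop :=
  (∀ w v, seen.get? w = some v ↔ paths[v]? = some w) ∧
  (seen.get? [] = none) ∧
  (∀ w x, (seen.get? (w ++ [x])).isSome → w = [] ∨ (seen.get? w).isSome) ∧
  (∀ s x, trans.get? (s, x) = (pvRep? paths s).bind (fun w => seen.get? (w ++ [x])))

-- the reference pass over one suffix, phrased as the prefix walk it is
def pvRefWalk : List Int → List Int →
    List (List Int) × List Int × PySem.Dict (List Int) Nat →
    List (List Int) × List Int × PySem.Dict (List Int) Nat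
  | [], _, st => st
  | x :: xs, pref, (paths, counts, seen) =>
    let sub := pref ++ [x]
    match seen.get? sub with
    | some idx => pvRefWalk xs sub (paths, counts.modify idx (· + 1), seen)
    | none => pvRefWalk xs sub (paths ++ [sub], counts ++ [1], seen.insert sub paths.length)

theorem pvRefWalk_mono (s : List Int) :
    ∀ (pref : List Int) (paths : List (List Int)) (counts : List Int)
      (seen : PySem.Dict (List Int) Nat) (key : List Int) (v : Nat),
    seen.get? key = some v →
    ((pvRefWalk s pref (paths, counts, seen)).2.2).get? key = some v := by
  induction s with
  | nil => intro _ _ _ _ _ _ h; exact h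
  | cons x xs ih =>
    intro pref paths counts seen key v h
    simp only [pvRefWalk]
    cases hs : seen.get? (pref ++ [x]) with
    | some idx => exact ih _ _ _ _ _ _ h
    | none =>
      refine ih _ _ _ _ _ _ ?_
      rw [PySem.Dict.get?_insert]
      split
      · next heq => rw [heq] at h; rw [h] at hs; cases hs
      · exact h

-- one reference step applied to an explicit substring
def pvApply (sub : List Int) (st : List (List Int) × List Int × PySem.Dict (List Int) Nat) :
    List (List Int) × List Int × PySem.Dict (List Int) Nat :=
  match st with
  | (p, c, seen) =>
    match seen.get? sub with
    | some idx => (p, c.modify idx (· + 1), seen)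
    | none => (p ++ [sub], c ++ [1], seen.insert sub p.length)

theorem pvStepB_eq (traj : List Int) (st : List (List Int) × List Int × PySem.Dict (List Int) Nat)
    (i j : Nat) : pvStepB traj st (i, j) = pvApply (pvSub traj i j) st := by
  obtain ⟨p, c, seen⟩ := st; rfl

theorem pvRefWalk_cons (x : Int) (xs pref : List Int)
    (st : List (List Int) × List Int × PySem.Dict (List Int) Nat) :
    pvRefWalk (x :: xs) pref st = pvRefWalk xs (pref ++ [x]) (pvApply (pref ++ [x]) st) := by
  obtain ⟨p, c, seen⟩ := st
  simp only [pvRefWalk, pvApply]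
  cases seen.get? (pref ++ [x]) <;> rfl

theorem pvWalk_of_prefixes (s : List Int) :
    ∀ (pref : List Int) (st : List (List Int) × List Int × PySem.Dict (List Int) Nat),
    ((List.range s.length).map (fun m => pref ++ s.take (m + 1))).foldl
        (fun st sub => pvApply sub st) st = pvRefWalk s pref st := by
  induction s with
  | nil => intro _ _; rfl
  | cons x xs ih =>
    intro pref st
    rw [List.length_cons, List.range_succ_eq_map, List.map_cons, List.map_map,
      List.foldl_cons, pvRefWalk_cons]
    have : ((fun m => pref ++ (x :: xs).take (m + 1)) ∘ Nat.succ) =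
        (fun m => (pref ++ [x]) ++ xs.take (m + 1)) := by
      funext m
      simp [List.take_succ_cons]
    rw [this]
    exact ih (pref ++ [x]) _

-- the reference inner fold over j equals the prefix walk
theorem pvRefFold_eq_walk (traj : List Int) (i : Nat)
    (st : List (List Int) × List Int × PySem.Dict (List Int) Nat) :
    (((List.range' (i + 1) (traj.length - i)).map (fun j => (i, j))).foldl (pvStepB traj) st) =
      pvRefWalk (traj.drop i) [] st := by
  rw [← pvWalk_of_prefixes (traj.drop i) [] st,
    List.range'_eq_map_range, List.map_map, List.foldl_map, List.foldl_map]
  rw [List.length_drop]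
  apply PySem.List.foldl_congr_mem
  intro st' m hm
  rw [List.mem_range] at hm
  show pvStepB traj st' (i, i + 1 + m) = pvApply ([] ++ (traj.drop i).take (m + 1)) st'
  rw [pvStepB_eq, List.nil_append]
  congr 1
  unfold pvSub
  rw [show ((i + 1 + m : Nat) : Int) = ((i + (m + 1) : Nat) : Int) by push_cast; ring,
    show (i + (m + 1) : Nat) = i + (m + 1) from rfl]
  rw [PySem.List.slice_natCast]
  congr 1
  omega


theorem pvRep?_append (paths : List (List Int)) (sub : List Int) (s : Int) (w : List Int)
    (h : pvRep? paths s = some w) : pvRep? (paths ++ [sub]) s = some w := by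
  unfold pvRep? at h ⊢
  split_ifs at h ⊢ with h1 h2
  · exact h
  · obtain ⟨hlt, _⟩ := List.getElem?_eq_some_iff.mp h
    rw [List.getElem?_append_left hlt]
    exact h

theorem pvRep?_inj (paths : List (List Int)) (seen : PySem.Dict (List Int) Nat)
    (W : ∀ w v, seen.get? w = some v ↔ paths[v]? = some w)
    (E : seen.get? [] = none) {s c : Int} {w : List Int}
    (hs : pvRep? paths s = some w) (hc : pvRep? paths c = some w) : s = c := by
  unfold pvRep? at hs hc
  by_cases h1 : s = -1 <;> by_cases h2 : c = -1
  · rw [h1, h2]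
  · exfalso
    rw [if_pos h1] at hs
    rw [if_neg h2] at hc
    injection hs with hs'
    split_ifs at hc with h3
    rw [← hs'] at hc
    have := (W [] c.toNat).mpr hc
    rw [this] at E; cases E
  · exfalso
    rw [if_pos h2] at hc
    rw [if_neg h1] at hs
    injection hc with hc'
    split_ifs at hs with h3
    rw [← hc'] at hs
    have := (W [] s.toNat).mpr hs
    rw [this] at E; cases E
  · rw [if_neg h1] at hs
    rw [if_neg h2] at hc
    split_ifs at hs with h3
    split_ifs at hc with h4
    have hsv := (W w s.toNat).mpr hs
    have hcv := (W w c.toNat).mpr hc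
    rw [hsv] at hcv
    injection hcv with h
    omega

theorem pvInv_insert (paths : List (List Int)) (seen : PySem.Dict (List Int) Nat)
    (trans : PySem.Dict (Int × Int) Nat) (pref : List Int) (cur x : Int)
    (hInv : pvInv paths seen trans) (hcur : pvRep? paths cur = some pref)
    (hnone : seen.get? (pref ++ [x]) = none) :
    pvInv (paths ++ [pref ++ [x]]) (seen.insert (pref ++ [x]) paths.length)
      (trans.insert (cur, x) paths.length) := by
  obtain ⟨W, E, P, T⟩ := hInv
  have hsubne : pref ++ [x] ≠ [] := by simp
  refine ⟨?_, ?_, ?_, ?_⟩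
  · intro w v
    rw [PySem.Dict.get?_insert]
    by_cases hw : w = pref ++ [x]
    · subst hw
      rw [if_pos rfl]
      constructor
      · intro h
        injection h with h
        rw [← h]
        exact List.getElem?_concat_length
      · intro h
        rcases Nat.lt_trichotomy v paths.length with hv | hv | hv
        · rw [List.getElem?_append_left hv] at h
          have := (W _ _).mpr h
          rw [this] at hnone; cases hnone
        · rw [hv]
        · rw [List.getElem?_eq_none (by simp; omega)] at h; cases h
    · rw [if_neg hw, W w v]
      constructor
      · intro h
        obtain ⟨hlt, _⟩ := List.getElem?_eq_some_iff.mp h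
        rw [List.getElem?_append_left hlt]
        exact h
      · intro h
        rcases Nat.lt_trichotomy v paths.length with hv | hv | hv
        · rwa [List.getElem?_append_left hv] at h
        · exfalso
          rw [hv, List.getElem?_concat_length] at h
          injection h with h
          exact hw h.symm
        · rw [List.getElem?_eq_none (by simp; omega)] at h; cases h
  · rw [PySem.Dict.get?_insert, if_neg (fun h => hsubne h.symm)]
    exact E
  · intro w y
    rw [PySem.Dict.get?_insert, PySem.Dict.get?_insert]
    by_cases hwy : w ++ [y] = pref ++ [x]
    · rw [if_pos hwy]
      intro _
      have hw : w = pref ∧ y = x := by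
        have hlen : w.length = pref.length := by
          have := congrArg List.length hwy; simp at this; omega
        obtain ⟨h1, h2⟩ := List.append_inj hwy hlen
        exact ⟨h1, by simpa using h2⟩
      by_cases hwnil : w = []
      · exact Or.inl hwnil
      · right
        have hprefne : pref ≠ [] := hw.1 ▸ hwnil
        rw [if_neg (by
          intro h
          rw [hw.1] at h
          have := congrArg List.length h
          simp at this)]
        rw [hw.1]
        unfold pvRep? at hcur
        split_ifs at hcur with h1 h2
        · injection hcur with hcur'; exact absurd hcur'.symm hprefne
        · have := (W pref cur.toNat).mpr hcur
          rw [this]; rfl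
    · rw [if_neg hwy]
      intro h
      rcases P w y h with h0 | h1
      · exact Or.inl h0
      · right
        by_cases hw : w = pref ++ [x]
        · rw [if_pos hw]; rfl
        · rw [if_neg hw]; exact h1
  · intro s y
    rw [PySem.Dict.get?_insert]
    by_cases hk : (s, y) = (cur, x)
    · rw [if_pos hk]
      injection hk with hs hy
      rw [hs, hy, pvRep?_append _ _ _ _ hcur]
      simp only [Option.bind_some]
      rw [PySem.Dict.get?_insert, if_pos rfl]
    · rw [if_neg hk, T s y]
      cases hrep : pvRep? paths s with
      | some w =>
        rw [pvRep?_append _ _ _ _ hrep]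
        simp only [Option.bind_some]
        rw [PySem.Dict.get?_insert]
        by_cases hwy : w ++ [y] = pref ++ [x]
        · exfalso
          have hw : w = pref ∧ y = x := by
            have hlen : w.length = pref.length := by
              have := congrArg List.length hwy; simp at this; omega
            obtain ⟨h1, h2⟩ := List.append_inj hwy hlen
            exact ⟨h1, by simpa using h2⟩
          have hsc : s = cur := pvRep?_inj paths seen W E hrep (by rw [hw.1]; exact hcur)
          exact hk (by rw [hsc, hw.2])
        · rw [if_neg hwy]
      | none =>
        simp only [Option.bind_none]
        unfold pvRep? at hrep ⊢
        by_cases h1 : s = -1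
        · rw [if_pos h1] at hrep; cases hrep
        · by_cases h2 : 0 ≤ s
          · rw [if_neg h1, if_pos h2] at hrep
            rw [if_neg h1, if_pos h2]
            have hge : paths.length ≤ s.toNat := by
              by_contra hlt
              rw [List.getElem?_eq_some_iff.mpr ⟨by omega, rfl⟩] at hrep
              cases hrep
            rcases Nat.eq_or_lt_of_le hge with heq | hlt
            · rw [← heq, List.getElem?_concat_length]
              simp only [Option.bind_some]
              rw [PySem.Dict.get?_insert, if_neg (by
                intro h
                have := congrArg List.length h
                simp at this)]
              cases hx : seen.get? ((pref ++ [x]) ++ [y]) with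
              | none => rfl
              | some v =>
                exfalso
                rcases P (pref ++ [x]) y (by rw [hx]; rfl) with h0 | h1
                · exact hsubne h0
                · rw [hnone] at h1; cases h1
            · rw [List.getElem?_eq_none (by simp; omega)]
              rfl
          · rw [if_neg h1, if_neg h2]
            rfl

-- the big simulation step: one walk of the reference and one walk of B agree
theorem pvSim (s : List Int) :
    ∀ (pref : List Int) (paths : List (List Int)) (counts : List Int)
      (seen : PySem.Dict (List Int) Nat) (trans : PySem.Dict (Int × Int) Nat)
      (row : List Int) (cur : Int),
    pvInv paths seen trans → pvRep? paths cur = some pref →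
    (s.foldl pvWalkStep (paths, counts, trans, row, cur, pref)).1 =
        (pvRefWalk s pref (paths, counts, seen)).1 ∧
    (s.foldl pvWalkStep (paths, counts, trans, row, cur, pref)).2.1 =
        (pvRefWalk s pref (paths, counts, seen)).2.1 ∧
    pvInv (pvRefWalk s pref (paths, counts, seen)).1
        (pvRefWalk s pref (paths, counts, seen)).2.2
        (s.foldl pvWalkStep (paths, counts, trans, row, cur, pref)).2.2.1 ∧
    (s.foldl pvWalkStep (paths, counts, trans, row, cur, pref)).2.2.2.1 =
        row ++ (List.range s.length).map (fun m =>
          (((pvRefWalk s pref (paths, counts, seen)).2.2.getD (pref ++ s.take (m + 1)) 0 : Nat) : Int)) ∧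
    (∀ m < s.length,
      (((pvRefWalk s pref (paths, counts, seen)).2.2).get? (pref ++ s.take (m + 1))).isSome) := by
  induction s with
  | nil =>
    intro pref paths counts seen trans row cur hInv hcur
    exact ⟨rfl, rfl, hInv, by simp, by intro m hm; simp at hm⟩
  | cons x xs ih =>
    intro pref paths counts seen trans row cur hInv hcur
    have hkey : trans.get? (cur, x) = seen.get? (pref ++ [x]) := by
      rw [hInv.2.2.2 cur x, hcur, Option.bind_some]
    rw [List.foldl_cons]
    cases hs : seen.get? (pref ++ [x]) with
    | some idx =>
      have hstep : pvWalkStep (paths, counts, trans, row, cur, pref) x =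
          (paths, counts.modify idx (· + 1), trans, row ++ [(idx : Int)], (idx : Int), pref ++ [x]) := by
        simp only [pvWalkStep, hkey, hs]
      have hwalk : pvRefWalk (x :: xs) pref (paths, counts, seen) =
          pvRefWalk xs (pref ++ [x]) (paths, counts.modify idx (· + 1), seen) := by
        simp only [pvRefWalk, hs]
      have hcur' : pvRep? paths ((idx : Nat) : Int) = some (pref ++ [x]) := by
        unfold pvRep?
        rw [if_neg (by omega), if_pos (by omega), Int.toNat_natCast]
        exact (hInv.1 _ _).mp hs
      obtain ⟨ih1, ih2, ih3, ih4, ih5⟩ := ih (pref ++ [x]) paths (counts.modify idx (· + 1))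
        seen trans (row ++ [(idx : Int)]) (idx : Int) hInv hcur'
      have hmono : ∀ key v, seen.get? key = some v →
          ((pvRefWalk xs (pref ++ [x]) (paths, counts.modify idx (· + 1), seen)).2.2).get? key = some v :=
        fun key v hv => pvRefWalk_mono xs _ _ _ _ key v hv
      rw [hstep, hwalk]
      refine ⟨ih1, ih2, ih3, ?_, ?_⟩
      · rw [ih4, List.length_cons, List.range_succ_eq_map, List.map_cons, List.map_map,
          List.append_assoc, List.singleton_append]
        congr 2
        · rw [List.take_succ_cons, List.take_zero,
            PySem.Dict.getD_eq_get?_getD, hmono _ _ hs]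
          rfl
        · apply List.map_congr_left
          intro m _
          simp [List.take_succ_cons, List.append_assoc]
      · intro m hm
        cases m with
        | zero =>
          rw [List.take_succ_cons, List.take_zero, hmono _ _ hs]
          rfl
        | succ m =>
          have := ih5 m (by simpa using hm)
          simpa [List.take_succ_cons, List.append_assoc] using this
    | none =>
      have hstep : pvWalkStep (paths, counts, trans, row, cur, pref) x =
          (paths ++ [pref ++ [x]], counts ++ [1], trans.insert (cur, x) paths.length,
           row ++ [(paths.length : Int)], (paths.length : Int), pref ++ [x]) := by
        simp only [pvWalkStep, hkey, hs]
      have hwalk : pvRefWalk (x :: xs) pref (paths, counts, seen) =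
          pvRefWalk xs (pref ++ [x])
            (paths ++ [pref ++ [x]], counts ++ [1], seen.insert (pref ++ [x]) paths.length) := by
        simp only [pvRefWalk, hs]
      have hInv' := pvInv_insert paths seen trans pref cur x hInv hcur hs
      have hcur' : pvRep? (paths ++ [pref ++ [x]]) ((paths.length : Nat) : Int) =
          some (pref ++ [x]) := by
        unfold pvRep?
        rw [if_neg (by omega), if_pos (by omega), Int.toNat_natCast]
        exact List.getElem?_concat_length
      obtain ⟨ih1, ih2, ih3, ih4, ih5⟩ := ih (pref ++ [x]) (paths ++ [pref ++ [x]]) (counts ++ [1])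
        (seen.insert (pref ++ [x]) paths.length) (trans.insert (cur, x) paths.length)
        (row ++ [(paths.length : Int)]) ((paths.length : Nat) : Int) hInv' hcur'
      have hins : (seen.insert (pref ++ [x]) paths.length).get? (pref ++ [x]) = some paths.length :=
        PySem.Dict.get?_insert_self _ _ _
      have hmono : ∀ key v, (seen.insert (pref ++ [x]) paths.length).get? key = some v →
          ((pvRefWalk xs (pref ++ [x]) (paths ++ [pref ++ [x]], counts ++ [1],
            seen.insert (pref ++ [x]) paths.length)).2.2).get? key = some v :=
        fun key v hv => pvRefWalk_mono xs _ _ _ _ key v hv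
      rw [hstep, hwalk]
      refine ⟨ih1, ih2, ih3, ?_, ?_⟩
      · rw [ih4, List.length_cons, List.range_succ_eq_map, List.map_cons, List.map_map,
          List.append_assoc, List.singleton_append]
        congr 2
        · rw [List.take_succ_cons, List.take_zero,
            PySem.Dict.getD_eq_get?_getD, hmono _ _ hins]
          rfl
        · apply List.map_congr_left
          intro m _
          simp [List.take_succ_cons, List.append_assoc]
      · intro m hm
        cases m with
        | zero =>
          rw [List.take_succ_cons, List.take_zero, hmono _ _ hins]
          rfl
        | succ m =>
          have := ih5 m (by simpa using hm)
          simpa [List.take_succ_cons, List.append_assoc] using this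

-- one id row is correct w.r.t. a dict
def pvRowOK (traj : List Int) (seen : PySem.Dict (List Int) Nat) (i : Nat) (row : List Int) : Prop :=
  row = (List.range (traj.length - i)).map (fun m =>
      ((seen.getD (pvSub traj i (i + m + 1)) 0 : Nat) : Int)) ∧
  ∀ m < traj.length - i, ((seen.get? (pvSub traj i (i + m + 1))).isSome)

theorem pvRowOK_mono (traj : List Int) (seen seen' : PySem.Dict (List Int) Nat) (i : Nat)
    (row : List Int)
    (hmono : ∀ key v, seen.get? key = some v → seen'.get? key = some v)
    (h : pvRowOK traj seen i row) : pvRowOK traj seen' i row := by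
  obtain ⟨h1, h2⟩ := h
  constructor
  · rw [h1]
    apply List.map_congr_left
    intro m hm
    rw [List.mem_range] at hm
    obtain ⟨v, hv⟩ := Option.isSome_iff_exists.mp (h2 m hm)
    rw [PySem.Dict.getD_eq_get?_getD, PySem.Dict.getD_eq_get?_getD, hv, hmono _ _ hv]
  · intro m hm
    obtain ⟨v, hv⟩ := Option.isSome_iff_exists.mp (h2 m hm)
    rw [hmono _ _ hv]
    rfl

theorem pvSub_take (traj : List Int) (i m : Nat) :
    pvSub traj i (i + m + 1) = (traj.drop i).take (m + 1) := by
  unfold pvSub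
  rw [PySem.List.slice_natCast]
  congr 1
  omega

-- the reference per-start loop body, named for the proofs
def pvRefInner (traj : List Int)
    (st : List (List Int) × List Int × PySem.Dict (List Int) Nat) (i : Nat) :
    List (List Int) × List Int × PySem.Dict (List Int) Nat :=
  pvRefWalk (traj.drop i) [] st

-- induction over the starts: the per-start walks of both sides, run over any list of starts
theorem pvStartsSim (traj : List Int) (is : List Nat) :
    ∀ (paths : List (List Int)) (counts : List Int) (seen : PySem.Dict (List Int) Nat)
      (trans : PySem.Dict (Int × Int) Nat) (ids : List (List Int)) (done : List Nat),
    pvInv paths seen trans →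
    ids.length = done.length →
    (∀ (p : Nat) r, ids[p]? = some r → ∃ i, done[p]? = some i ∧ pvRowOK traj seen i r) →
    (is.foldl (pvAltInner traj) (paths, counts, trans, ids)).1 =
      (is.foldl (pvRefInner traj) (paths, counts, seen)).1 ∧
    (is.foldl (pvAltInner traj) (paths, counts, trans, ids)).2.1 =
      (is.foldl (pvRefInner traj) (paths, counts, seen)).2.1 ∧
    pvInv (is.foldl (pvRefInner traj) (paths, counts, seen)).1
      (is.foldl (pvRefInner traj) (paths, counts, seen)).2.2
      (is.foldl (pvAltInner traj) (paths, counts, trans, ids)).2.2.1 ∧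
    (is.foldl (pvAltInner traj) (paths, counts, trans, ids)).2.2.2.length = (done ++ is).length ∧
    (∀ (p : Nat) r, ((is.foldl (pvAltInner traj) (paths, counts, trans, ids)).2.2.2)[p]? = some r →
      ∃ i, (done ++ is)[p]? = some i ∧
        pvRowOK traj (is.foldl (pvRefInner traj) (paths, counts, seen)).2.2 i r) := by
  induction is with
  | nil =>
    intro paths counts seen trans ids done hInv hlen hrows
    exact ⟨rfl, rfl, hInv, by simpa using hlen, by simpa using hrows⟩
  | cons i is' ih =>
    intro paths counts seen trans ids done hInv hlen hrows
    rw [List.foldl_cons, List.foldl_cons]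
    obtain ⟨s1, s2, s3, s4, s5⟩ := pvSim (traj.drop i) [] paths counts seen trans [] (-1) hInv
      (by unfold pvRep?; rw [if_pos rfl])
    rcases hEq : (traj.drop i).foldl pvWalkStep (paths, counts, trans, [], -1, []) with
      ⟨p1, c1, tr1, row1, cur1, pref1⟩
    rw [hEq] at s1 s2 s3 s4
    simp only at s1 s2 s3 s4
    have hAlt : pvAltInner traj (paths, counts, trans, ids) i = (p1, c1, tr1, ids ++ [row1]) := by
      unfold pvAltInner
      rw [PySem.List.slice_from_natCast traj i]
      show (match (traj.drop i).foldl pvWalkStep (paths, counts, trans, [], -1, []) with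
            | (p', c', tr', row, _, _) => (p', c', tr', ids ++ [row])) = _
      rw [hEq]
    have hRef : pvRefInner traj (paths, counts, seen) i =
        pvRefWalk (traj.drop i) [] (paths, counts, seen) := rfl
    subst s1
    subst s2
    rw [hAlt, hRef,
      show pvRefWalk (traj.drop i) [] (paths, counts, seen) =
        ((pvRefWalk (traj.drop i) [] (paths, counts, seen)).1,
         (pvRefWalk (traj.drop i) [] (paths, counts, seen)).2.1,
         (pvRefWalk (traj.drop i) [] (paths, counts, seen)).2.2) from rfl]
    have hmono : ∀ key v, seen.get? key = some v →
        ((pvRefWalk (traj.drop i) [] (paths, counts, seen)).2.2).get? key = some v :=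
      fun key v hv => pvRefWalk_mono (traj.drop i) [] paths counts seen key v hv
    have hlen' : (ids ++ [row1]).length = (done ++ [i]).length := by simp [hlen]
    have hrows' : ∀ (p : Nat) r', (ids ++ [row1])[p]? = some r' →
        ∃ i', (done ++ [i])[p]? = some i' ∧
          pvRowOK traj (pvRefWalk (traj.drop i) [] (paths, counts, seen)).2.2 i' r' := by
      intro p r' hp
      by_cases hplt : p < ids.length
      · rw [List.getElem?_append_left hplt] at hp
        obtain ⟨i', hdone, hOK⟩ := hrows p r' hp
        refine ⟨i', ?_, pvRowOK_mono traj seen _ i' r' hmono hOK⟩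
        rw [List.getElem?_append_left (by omega)]
        exact hdone
      · have hpeq : p = ids.length := by
          by_contra hne
          rw [List.getElem?_eq_none (by simp; omega)] at hp
          cases hp
        subst hpeq
        rw [List.getElem?_concat_length] at hp
        injection hp with hp
        subst hp
        refine ⟨i, ?_, ?_, ?_⟩
        · rw [hlen, List.getElem?_concat_length]
        · rw [s4]
          simp only [List.nil_append, List.length_drop]
          apply List.map_congr_left
          intro m hm
          rw [pvSub_take]
        · intro m hm
          have := s5 m (by rw [List.length_drop]; omega)
          rw [pvSub_take]
          simpa using this
    obtain ⟨I1, I2, I3, I4, I5⟩ := ih (pvRefWalk (traj.drop i) [] (paths, counts, seen)).1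
      (pvRefWalk (traj.drop i) [] (paths, counts, seen)).2.1
      (pvRefWalk (traj.drop i) [] (paths, counts, seen)).2.2
      tr1 (ids ++ [row1]) (done ++ [i]) s3 hlen' hrows'
    refine ⟨I1, I2, I3, ?_, ?_⟩
    · rw [I4]; simp
    · intro p r' hp
      obtain ⟨i', hdone, hOK⟩ := I5 p r' hp
      exact ⟨i', by simpa using hdone, hOK⟩

-- per-trajectory simulation
theorem pvTraj_sim (traj : List Int)
    (paths : List (List Int)) (counts : List Int) (covers : List (List (List Int)))
    (seen : PySem.Dict (List Int) Nat) (trans : PySem.Dict (Int × Int) Nat)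
    (hInv : pvInv paths seen trans) :
    (pvTrajAlt (paths, counts, covers, trans) traj).1 = (pvTrajB (paths, counts, covers, seen) traj).1 ∧
    (pvTrajAlt (paths, counts, covers, trans) traj).2.1 = (pvTrajB (paths, counts, covers, seen) traj).2.1 ∧
    (pvTrajAlt (paths, counts, covers, trans) traj).2.2.1 = (pvTrajB (paths, counts, covers, seen) traj).2.2.1 ∧
    pvInv (pvTrajB (paths, counts, covers, seen) traj).1
      (pvTrajB (paths, counts, covers, seen) traj).2.2.2
      (pvTrajAlt (paths, counts, covers, trans) traj).2.2.2 := by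
  have hPairs : (pvPairsB traj.length).foldl (pvStepB traj) (paths, counts, seen) =
      (List.range traj.length).foldl (pvRefInner traj) (paths, counts, seen) := by
    rw [pvPairsB, List.foldl_flatMap]
    apply PySem.List.foldl_congr_mem
    intro st i _
    exact pvRefFold_eq_walk traj i st
  obtain ⟨A1, A2, A3, A4, A5⟩ := pvStartsSim traj (List.range traj.length) paths counts seen
    trans [] [] hInv rfl (by intro p r h; simp at h)
  rcases hR : (List.range traj.length).foldl (pvRefInner traj) (paths, counts, seen) with ⟨P, C, S⟩
  rcases hA : (List.range traj.length).foldl (pvAltInner traj) (paths, counts, trans, []) with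
    ⟨P2, C2, TR, ids⟩
  rw [hR] at A3 A5
  rw [hA] at A1 A2 A3 A4 A5
  simp only at A1 A2 A3 A4 A5
  subst A1
  subst A2
  have hB : pvTrajB (paths, counts, covers, seen) traj = (P, C, covers ++ [pvCoverB traj S], S) := by
    unfold pvTrajB
    show (match (pvPairsB traj.length).foldl (pvStepB traj) (paths, counts, seen) with
          | (p, c, s) => (p, c, covers ++ [pvCoverB traj s], s)) = _
    rw [hPairs, hR]
  have hlen : ids.length = traj.length := by simpa using A4
  have hrow : ∀ i : Nat, i < traj.length →
      ids[i]? = some ((List.range (traj.length - i)).map (fun m =>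
        ((S.getD (pvSub traj i (i + m + 1)) 0 : Nat) : Int))) ∧
      (∀ m < traj.length - i, (S.get? (pvSub traj i (i + m + 1))).isSome) := by
    intro i hi
    have hilt : i < ids.length := by omega
    obtain ⟨i', hi', hOK⟩ := A5 i ids[i] (List.getElem?_eq_getElem hilt)
    have hii : i' = i := by
      rw [List.nil_append, List.getElem?_range hi] at hi'
      injection hi' with h
      exact h.symm
    subst hii
    exact ⟨by rw [List.getElem?_eq_getElem hilt, hOK.1], hOK.2⟩
  have hAlt : pvTrajAlt (paths, counts, covers, trans) traj =
      (P, C, covers ++ [(List.range traj.length).map (fun (k : Nat) =>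
        (List.range (k + 1)).flatMap (fun (i : Nat) =>
          PySem.List.slice (PySem.List.pyGetD ids (i : Int) [])
            (some ((k - i : Nat) : Int)) none))], TR) := by
    unfold pvTrajAlt
    show (match (List.range traj.length).foldl (pvAltInner traj)
          (paths, counts, trans, ([] : List (List Int))) with
          | (p, c, tr, ids) =>
            (p, c, covers ++ [(List.range traj.length).map (fun (k : Nat) =>
              (List.range (k + 1)).flatMap (fun (i : Nat) =>
                PySem.List.slice (PySem.List.pyGetD ids (i : Int) [])
                  (some ((k - i : Nat) : Int)) none))], tr)) = _
    rw [hA]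
    try rw [hR]
    try rfl
  have hcov : (List.range traj.length).map (fun (k : Nat) =>
      (List.range (k + 1)).flatMap (fun (i : Nat) =>
        PySem.List.slice (PySem.List.pyGetD ids (i : Int) [])
          (some ((k - i : Nat) : Int)) none)) = pvCoverB traj S := by
    unfold pvCoverB
    apply List.map_congr_left
    intro k hk
    rw [List.mem_range] at hk
    apply List.flatMap_congr
    intro i hi
    rw [List.mem_range] at hi
    have hilt : i < traj.length := by omega
    rw [PySem.List.pyGetD_natCast, List.getD_eq_getElem?_getD, (hrow i hilt).1]
    simp only [Option.getD_some]
    rw [PySem.List.slice_from_natCast, ← List.map_drop, List.range_eq_range', List.drop_range']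
    have h1 : (0 + (k - i) * 1) = k - i := by omega
    have h2 : traj.length - i - (k - i) = traj.length - k := by omega
    rw [h1, h2, List.range'_eq_map_range, List.range'_eq_map_range, List.map_map, List.map_map]
    apply List.map_congr_left
    intro t _
    simp only [Function.comp_def]
    have h3 : i + (k - i + t) + 1 = k + 1 + t := by omega
    rw [h3]
  constructor
  · rw [hB, hAlt]
  constructor
  · rw [hB, hAlt]
  constructor
  · rw [hB, hAlt, hcov]
  · rw [hB, hAlt]
    exact A3

-- outer fold over the trajectories
theorem pvOuter_sim (ts : List (List Int)) :
    ∀ (paths : List (List Int)) (counts : List Int) (covers : List (List (List Int)))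
      (seen : PySem.Dict (List Int) Nat) (trans : PySem.Dict (Int × Int) Nat),
    pvInv paths seen trans →
    (ts.foldl pvTrajAlt (paths, counts, covers, trans)).1 =
        (ts.foldl pvTrajB (paths, counts, covers, seen)).1 ∧
    (ts.foldl pvTrajAlt (paths, counts, covers, trans)).2.1 =
        (ts.foldl pvTrajB (paths, counts, covers, seen)).2.1 ∧
    (ts.foldl pvTrajAlt (paths, counts, covers, trans)).2.2.1 =
        (ts.foldl pvTrajB (paths, counts, covers, seen)).2.2.1 := by
  induction ts with
  | nil => intro _ _ _ _ _ _; exact ⟨rfl, rfl, rfl⟩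
  | cons t ts' ih =>
    intro paths counts covers seen trans hInv
    rw [List.foldl_cons, List.foldl_cons]
    obtain ⟨T1, T2, T3, T4⟩ := pvTraj_sim t paths counts covers seen trans hInv
    rcases hRB : pvTrajB (paths, counts, covers, seen) t with ⟨P, C, COV, S⟩
    rcases hRA : pvTrajAlt (paths, counts, covers, trans) t with ⟨P2, C2, COV2, TR⟩
    rw [hRB, hRA] at T1 T2 T3 T4
    simp only at T1 T2 T3 T4
    subst T1
    subst T2
    subst T3
    exact ih _ _ _ S TR T4

theorem pvInv_empty : pvInv [] PySem.Dict.empty PySem.Dict.empty := by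
  refine ⟨?_, ?_, ?_, ?_⟩
  · intro w v
    simp [PySem.Dict.get?_empty]
  · simp [PySem.Dict.get?_empty]
  · intro w x h
    simp [PySem.Dict.get?_empty] at h
  · intro s x
    unfold pvRep?
    split_ifs <;> simp [PySem.Dict.get?_empty]

-- ===== VERDICT (by name: the statement is the Claim_ definition above) =====
theorem FindAllPossiblePathlets_spec : Claim_equal_FindAllPossiblePathlets := by
  intro trajectories _
  unfold Spec_FindAllPossiblePathlets FindAllPossiblePathlets FindAllPossiblePathlets_alt
  rw [show pvTrajA = pvTrajB from funext fun st => funext fun traj => pvTraj_eq st traj]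
  obtain ⟨h1, h2, h3⟩ := pvOuter_sim trajectories [] [] [] PySem.Dict.empty PySem.Dict.empty pvInv_empty
  rcases hR : trajectories.foldl pvTrajB ([], [], [], PySem.Dict.empty) with ⟨p, c, cov, sd⟩
  rcases hA : trajectories.foldl pvTrajAlt ([], [], [], PySem.Dict.empty) with ⟨p2, c2, cov2, td⟩
  rw [hR, hA] at h1 h2 h3
  simp only at h1 h2 h3
  simp [h1, h2, h3]
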